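-- pv_equiv track=rewrite | github.com/ajujo/teaching-system | src/teaching/core/unit_planner.py | _partition_sections
-- ===== SOURCE A (Python) =====
-- def _partition_sections(
--     section_ids: list[str],
--     num_units: int,
-- ) -> list[list[str]]:
--     """Partition sections into num_units continuous groups.
--
--     Distributes sections as evenly as possible.
--     """
--     if not section_ids:
--         return [[]]  # One empty unit for chapter with no sections
--
--     if num_units <= 1:
--         return [section_ids]
--
--     # Distribute sections evenly
--     n = len(section_ids)
--     base_size = n // num_units
--     remainder = n % num_units
--
--     partitions = []
--     start = 0
--
--     for i in range(num_units):
--         # Add one extra section to first 'remainder' partitions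
--         size = base_size + (1 if i < remainder else 0)
--         if size > 0:
--             partitions.append(section_ids[start:start + size])
--             start += size
--         else:
--             # Empty partition - shouldn't happen with proper thresholds
--             partitions.append([])
--
--     return partitions
-- ===== SOURCE B (Python) =====
-- def _partition_sections(
--     section_ids: list[str],
--     num_units: int,
-- ) -> list[list[str]]:
--     """Partition sections into num_units continuous groups (greedy head-split).
--
--     Repeatedly peels off the first ceil(remaining/k) sections for the next unit
--     and continues with k-1 units on the remainder; no base_size/remainder math.
--     """
--     if not section_ids:
--         return [[]]
--     if num_units <= 1:
--         return [section_ids]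
--     out = []
--     start = 0
--     k = num_units
--     while k > 1:
--         s = -(-(len(section_ids) - start) // k)  # ceiling of what is left
--         out.append(section_ids[start:start + s])
--         start += s
--         k -= 1
--     out.append(section_ids[start:])
--     return out
-- ===== Notes on version B (the rewrite author's own statement) =====
-- stated objective: alternative
-- what changed: Replaces A's single pass with precomputed base_size/remainder, a per-index extra-element test and a running start accumulator by a greedy head-split loop: repeatedly peel off ceil(len(rest)/k) sections for the next unit and continue on the remainder with k-1 units, recomputing the ceiling each step with no base_size/remainder computation.
import Mathlib
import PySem

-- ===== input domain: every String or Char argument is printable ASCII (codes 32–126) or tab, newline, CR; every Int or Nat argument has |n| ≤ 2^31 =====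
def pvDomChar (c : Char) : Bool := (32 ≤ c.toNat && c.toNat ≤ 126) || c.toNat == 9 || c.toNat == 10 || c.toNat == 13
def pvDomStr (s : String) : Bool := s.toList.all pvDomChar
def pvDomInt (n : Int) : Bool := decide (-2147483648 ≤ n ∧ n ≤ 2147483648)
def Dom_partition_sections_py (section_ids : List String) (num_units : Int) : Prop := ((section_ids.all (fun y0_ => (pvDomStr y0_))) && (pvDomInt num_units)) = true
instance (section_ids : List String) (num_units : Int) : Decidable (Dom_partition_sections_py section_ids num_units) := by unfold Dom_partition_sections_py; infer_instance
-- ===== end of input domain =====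

-- B replaces A's precomputed base_size/remainder and per-index extra-element test by a
-- greedy head-split loop: peel ceil(remaining/k) sections per unit, k counting down; objective: alternative.

-- ===== PORT A =====
-- literal port of A: base_size/remainder precomputed, running `start` accumulator threaded through the loop
def partition_sections_py (section_ids : List String) (num_units : Int) : List (List String) :=
  if section_ids = [] then [[]]
  else if num_units ≤ 1 then [section_ids]
  else
    let n : Int := section_ids.length
    let base_size := PySem.Int.floordiv n num_units
    let remainder := PySem.Int.mod n num_units
    let res := (PySem.List.pyRange 0 num_units 1).foldl
      (fun (st : List (List String) × Int) i =>
        let size := base_size + (if i < remainder then 1 else 0)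
        if size > 0 then
          (st.1 ++ [PySem.List.slice section_ids (some st.2) (some (st.2 + size))], st.2 + size)
        else
          (st.1 ++ [([] : List String)], st.2))
      ([], 0)
    res.1

-- ===== PORT B =====
-- B-side helper: the while loop with state (out, start, k); s = ceil(remaining/k) via Python's -(-rem // k)
def pvChunks (xs : List String) (out : List (List String)) (start k : Int) : List (List String) :=
  if h : k ≤ 1 then out ++ [PySem.List.slice xs (some start) none]
  else
    let s := -(PySem.Int.floordiv (-((xs.length : Int) - start)) k)
    pvChunks xs (out ++ [PySem.List.slice xs (some start) (some (start + s))]) (start + s) (k - 1)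
termination_by k.toNat
decreasing_by omega

def partition_sections_py_alt (section_ids : List String) (num_units : Int) : List (List String) :=
  if section_ids = [] then [[]]
  else if num_units ≤ 1 then [section_ids]
  else pvChunks section_ids [] 0 num_units

-- ===== PRECONDITION & SPEC =====
def Spec_partition_sections_py (section_ids : List String) (num_units : Int) (out : List (List String)) : Prop := out = partition_sections_py_alt section_ids num_units
instance (section_ids : List String) (num_units : Int) (out : List (List String)) : Decidable (Spec_partition_sections_py section_ids num_units out) := by unfold Spec_partition_sections_py; infer_instance

-- ===== CLAIM (what is proved, stated in full; the proofs are below) =====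
def Claim_equal_partition_sections_py : Prop := ∀ (section_ids : List String) (num_units : Int), Dom_partition_sections_py section_ids num_units → Spec_partition_sections_py section_ids num_units (partition_sections_py section_ids num_units)

-- ===== LEMMAS AND PROOFS =====

-- the cumulative boundary of group i in the even partition (proof-only intermediary)
def pvBound (q r i : Int) : Int := i * q + min i r

-- an empty-range slice is empty
lemma slice_self_nil (xs : List String) (a : Int) :
    PySem.List.slice xs (some a) (some a) = [] := by
  apply List.eq_nil_of_length_eq_zero
  simp [PySem.List.length_slice]

-- boundary step: bound (i+1) = bound i + size_i
lemma pvBound_succ (q r i : Int) :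
    pvBound q r (i + 1) = pvBound q r i + (q + (if i < r then 1 else 0)) := by
  unfold pvBound
  have : (i + 1) * q = i * q + q := by ring
  rw [this]
  split_ifs with h <;> omega

-- A's loop invariant: the fold over the remaining range, started at the correct
-- boundary, appends exactly the boundary-map slices for that range
lemma loop_inv (sec : List String) (q r : Int) (hq : 0 ≤ q) :
    ∀ (m : Nat) (k u : Int), u - k = (m : Int) →
    ∀ (acc : List (List String)),
    ((PySem.List.pyRange k u 1).foldl
      (fun (st : List (List String) × Int) i =>
        if (q + if i < r then 1 else 0) > 0 then
          (st.1 ++ [PySem.List.slice sec (some st.2) (some (st.2 + (q + if i < r then 1 else 0)))],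
            st.2 + (q + if i < r then 1 else 0))
        else
          (st.1 ++ [([] : List String)], st.2))
      (acc, pvBound q r k)).1
    = acc ++ (PySem.List.pyRange k u 1).map
        (fun i => PySem.List.slice sec (some (pvBound q r i)) (some (pvBound q r (i + 1)))) := by
  intro m
  induction m with
  | zero =>
    intro k u hm acc
    rw [PySem.List.pyRange_one_eq_nil (by omega)]
    simp
  | succ m ih =>
    intro k u hm acc
    rw [PySem.List.pyRange_one_cons (by omega)]
    simp only [List.foldl_cons, List.map_cons]
    have hb := pvBound_succ q r k
    by_cases hpos : (0 : Int) < q + (if k < r then 1 else 0)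
    · rw [if_pos hpos, ← hb,
        ih (k + 1) u (by omega) (acc ++ [PySem.List.slice sec (some (pvBound q r k)) (some (pvBound q r (k + 1)))])]
      simp [hb]
    · have hsz : q + (if k < r then 1 else 0) = 0 := by split_ifs at hpos ⊢ <;> omega
      have hb' : pvBound q r (k + 1) = pvBound q r k := by rw [hb, hsz]; ring
      rw [if_neg hpos, show pvBound q r k = pvBound q r (k + 1) from hb'.symm,
        ih (k + 1) u (by omega) (acc ++ [([] : List String)])]
      simp [hb', slice_self_nil]

-- range shift: map over 1..b equals map (·+1) over 0..b-1
lemma map_pyRange_shift (f : Int → List String) :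
    ∀ (m : Nat) (a b : Int), b - a = (m : Int) →
    (PySem.List.pyRange (a + 1) (b + 1) 1).map f
      = (PySem.List.pyRange a b 1).map (fun i => f (i + 1)) := by
  intro m
  induction m with
  | zero =>
    intro a b hm
    rw [PySem.List.pyRange_one_eq_nil (by omega), PySem.List.pyRange_one_eq_nil (by omega)]
    simp
  | succ m ih =>
    intro a b hm
    rw [PySem.List.pyRange_one_cons (a := a + 1) (b := b + 1) (by omega),
      PySem.List.pyRange_one_cons (a := a) (b := b) (by omega)]
    simp only [List.map_cons]
    rw [ih (a + 1) b (by omega)]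

-- B's loop computes the boundary-map partition of the not-yet-assigned suffix
lemma chunks_eq_bounds (xs : List String) :
    ∀ (m : Nat) (out : List (List String)) (start k : Int), k = (m : Int) + 1 →
    0 ≤ start → start ≤ (xs.length : Int) →
    pvChunks xs out start k
      = out ++ (PySem.List.pyRange 0 k 1).map
          (fun i => PySem.List.slice xs
            (some (start + pvBound (PySem.Int.floordiv ((xs.length : Int) - start) k)
                                   (PySem.Int.mod ((xs.length : Int) - start) k) i))
            (some (start + pvBound (PySem.Int.floordiv ((xs.length : Int) - start) k)
                                   (PySem.Int.mod ((xs.length : Int) - start) k) (i + 1)))) := by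
  intro m
  induction m with
  | zero =>
    intro out start k hk h0s hsn
    subst hk
    rw [pvChunks, dif_pos (by omega)]
    rw [show ((0:Nat):Int) + 1 = 1 from by norm_num]
    rw [PySem.List.pyRange_one_cons (by omega), PySem.List.pyRange_one_eq_nil (by omega)]
    simp only [List.map_cons, List.map_nil]
    have hq : PySem.Int.floordiv ((xs.length : Int) - start) 1 = (xs.length : Int) - start := by
      rw [PySem.Int.floordiv_eq_ediv_of_pos (by omega)]; simp
    have hr : PySem.Int.mod ((xs.length : Int) - start) 1 = 0 := by
      rw [PySem.Int.mod_eq_emod_of_pos (by omega)]; simp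
    rw [hq, hr]
    have hb0 : start + pvBound ((xs.length : Int) - start) 0 0 = start := by unfold pvBound; omega
    have hb1 : start + pvBound ((xs.length : Int) - start) 0 (0 + 1) = (xs.length : Int) := by
      unfold pvBound; omega
    rw [hb0, hb1, PySem.List.slice_from xs h0s,
      PySem.List.slice_toNat xs h0s (by positivity)]
    rw [List.take_of_length_le (by simp)]
  | succ m ih =>
    intro out start k hk h0s hsn
    have hk2 : (2 : Int) ≤ k := by omega
    rw [pvChunks, dif_neg (by omega)]
    simp only []
    set N : Int := (xs.length : Int) - start with hN
    have hN0 : 0 ≤ N := by omega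
    set q := PySem.Int.floordiv N k with hqdef
    set r := PySem.Int.mod N k with hrdef
    have hqr : q * k + r = N := PySem.Int.floordiv_mul_add_mod N k
    have hr0 : 0 ≤ r := PySem.Int.mod_nonneg N (by omega)
    have hrk : r < k := PySem.Int.mod_lt N (by omega)
    have hq0 : 0 ≤ q := by
      rw [hqdef, PySem.Int.floordiv_eq_ediv_of_pos (by omega)]
      exact Int.ediv_nonneg hN0 (by omega)
    have hqk : 0 ≤ q * k := mul_nonneg hq0 (by omega)
    have hqk1 : q ≤ q * k := le_mul_of_one_le_right hq0 (by omega)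
    -- the ceiling s = q + δ where δ = 1 iff r > 0
    set δ : Int := if 0 < r then 1 else 0 with hδdef
    have hδc : (δ = 1 ∧ 0 < r) ∨ (δ = 0 ∧ r = 0) := by
      rw [hδdef]; split_ifs with h
      · exact Or.inl ⟨rfl, h⟩
      · exact Or.inr ⟨rfl, by omega⟩
    have hs : -(PySem.Int.floordiv (-N) k) = q + δ := by
      rw [PySem.Int.neg_floordiv_neg_eq_iff_of_pos (by omega : (0:Int) < k)]
      have e1 : (q + δ - 1) * k = q * k + δ * k - k := by ring
      have e2 : (q + δ) * k = q * k + δ * k := by ring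
      rw [e1, e2]
      rcases hδc with ⟨h1, h2⟩ | ⟨h1, h2⟩ <;> rw [h1] <;> constructor <;> linarith
    rw [hs]
    have hsnn : 0 ≤ q + δ := by rcases hδc with ⟨h1, _⟩ | ⟨h1, _⟩ <;> omega
    have hsle : q + δ ≤ N := by
      rcases hδc with ⟨h1, h2⟩ | ⟨h1, h2⟩ <;> rw [h1] at * <;> linarith
    -- quotient/remainder of the remaining suffix
    have hNrest : (xs.length : Int) - (start + (q + δ)) = N - (q + δ) := by omega
    have hq' : PySem.Int.floordiv ((xs.length : Int) - (start + (q + δ))) (k - 1) = q := by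
      rw [hNrest, PySem.Int.floordiv_eq_iff_of_pos (by omega : (0:Int) < k - 1)]
      have e1 : q * (k - 1) = q * k - q := by ring
      have e2 : (q + 1) * (k - 1) = q * k + k - q - 1 := by ring
      rw [e1, e2]
      rcases hδc with ⟨h1, h2⟩ | ⟨h1, h2⟩ <;> rw [h1] <;> constructor <;> linarith
    have hr' : PySem.Int.mod ((xs.length : Int) - (start + (q + δ))) (k - 1) = r - δ := by
      have hmm := PySem.Int.floordiv_mul_add_mod ((xs.length : Int) - (start + (q + δ))) (k - 1)
      rw [hq'] at hmm
      have e1 : q * (k - 1) = q * k - q := by ring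
      rw [e1] at hmm
      rw [hNrest] at hmm ⊢
      linarith
    -- apply the IH to the remaining suffix
    rw [ih (out ++ [PySem.List.slice xs (some start) (some (start + (q + δ)))])
      (start + (q + δ)) (k - 1) (by omega) (by omega) (by omega), hq', hr']
    -- unfold the boundary map on the right-hand side's range
    rw [PySem.List.pyRange_one_cons (by omega : (0:Int) < k)]
    simp only [List.map_cons]
    have hb01 : start + pvBound q r 0 = start := by unfold pvBound; omega
    have hb1 : start + pvBound q r (0 + 1) = start + (q + δ) := by
      unfold pvBound
      rcases hδc with ⟨h1, h2⟩ | ⟨h1, h2⟩ <;> rw [h1] <;> simp <;> omega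
    rw [hb01, hb1]
    simp only [List.append_assoc, List.singleton_append]
    congr 2
    -- tails: reindex 1..k as 0..k-1 shifted by one
    have hshift := map_pyRange_shift
      (fun i => PySem.List.slice xs (some (start + pvBound q r i)) (some (start + pvBound q r (i + 1))))
      (m + 1) 0 (k - 1) (by omega)
    rw [show (k - 1) + 1 = k from by ring] at hshift
    simp only [zero_add] at hshift ⊢
    rw [hshift]
    apply List.map_congr_left
    intro j hj
    have hjmem := PySem.List.mem_pyRange_one.mp hj
    have hj0 : 0 ≤ j := hjmem.1
    -- boundary shift: bound q r (t+1) = (q+δ) + bound q (r-δ) t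
    have hb_shift : ∀ (t : Int), 0 ≤ t →
        pvBound q r (t + 1) = (q + δ) + pvBound q (r - δ) t := by
      intro t ht
      unfold pvBound
      have e : (t + 1) * q = t * q + q := by ring
      rw [e]
      rcases hδc with ⟨h1, h2⟩ | ⟨h1, h2⟩ <;> rw [h1] <;> omega
    rw [hb_shift j hj0, hb_shift (j + 1) (by omega)]
    simp only [add_assoc]

theorem partition_sections_py_spec : Claim_equal_partition_sections_py := by
  unfold Claim_equal_partition_sections_py Spec_partition_sections_py
  intro sec u _
  unfold partition_sections_py partition_sections_py_alt
  by_cases h1 : sec = []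
  · simp [h1]
  · by_cases h2 : u ≤ 1
    · simp [h1, h2]
    · simp only [if_neg h1, if_neg h2]
      set n : Int := (sec.length : Int) with hn
      have hu : (0 : Int) < u := by omega
      have hq : (0 : Int) ≤ PySem.Int.floordiv n u := by
        rw [PySem.Int.floordiv_eq_ediv_of_pos hu]
        exact Int.ediv_nonneg (by positivity) (le_of_lt hu)
      have hr : (0 : Int) ≤ PySem.Int.mod n u := PySem.Int.mod_nonneg n (by omega)
      have h0 : pvBound (PySem.Int.floordiv n u) (PySem.Int.mod n u) 0 = 0 := by
        unfold pvBound; omega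
      have key := loop_inv sec (PySem.Int.floordiv n u) (PySem.Int.mod n u) hq
        u.toNat 0 u (by omega) []
      rw [h0] at key
      rw [chunks_eq_bounds sec (u.toNat - 1) [] 0 u (by omega) (by omega) (by positivity)]
      simp only [zero_add, sub_zero]
      simpa using key
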